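-- pv_equiv track=rewrite | github.com/CryptoExperts/AC21-divprop-convexity | packages/divprop/tests/test_DivCore.py | size_reduce_set_naive
-- ===== SOURCE A (Python) =====
-- def hw(x):
--     return sum(map(int, bin(x)[2:]))
--
-- def covers(a, b):
--     return a & b == b
--
-- def size_reduce_set_naive(kset):
--     kset = sorted(kset, key=hw)
--     i = 0
--     while i < len(kset):
--         top = []
--         x = kset[i]
--         for y in kset[i+1:]:
--             if not covers(y, x):
--                 top.append(y)
--         kset[i+1:] = top
--         i += 1
--     return set(kset)
-- ===== SOURCE B (Python) =====
-- def hw(x):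
--     return sum(map(int, bin(x)[2:]))
--
-- def covers(a, b):
--     return a & b == b
--
-- def size_reduce_set_naive(kset):
--     # Grow the set of kept minimal elements; a candidate is kept only if
--     # no already-kept element is a bitmask subset of it.
--     result = []
--     for x in sorted(kset, key=hw):
--         if not any(covers(x, k) for k in result):
--             result.append(x)
--     return set(result)
-- ===== Notes on version B (the rewrite author's own statement) =====
-- stated objective: alternative
-- what changed: A shrinks a worklist in place, repeatedly rewriting the tail kset[i+1:] to delete forward every superset of the current element; B instead grows an accumulator of kept minimal elements and admits each hw-sorted candidate only if no kept element covers it, never touching the remaining input.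
import Mathlib
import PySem

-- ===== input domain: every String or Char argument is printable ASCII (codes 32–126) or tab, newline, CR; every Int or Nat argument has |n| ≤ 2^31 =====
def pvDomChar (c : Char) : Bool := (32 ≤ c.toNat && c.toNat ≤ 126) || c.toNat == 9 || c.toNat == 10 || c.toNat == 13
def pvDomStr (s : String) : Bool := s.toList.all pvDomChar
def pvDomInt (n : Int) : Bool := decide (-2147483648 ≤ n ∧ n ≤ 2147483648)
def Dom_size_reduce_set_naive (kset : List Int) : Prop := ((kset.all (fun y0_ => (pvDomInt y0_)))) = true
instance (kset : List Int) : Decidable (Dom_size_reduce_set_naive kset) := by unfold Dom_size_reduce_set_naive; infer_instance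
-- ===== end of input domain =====

-- B replaces A's in-place forward deletion of supersets from a shrinking worklist by a
-- growing accumulator of kept minimal elements tested against each hw-sorted candidate
-- (objective: alternative decomposition, same O(n^2) cost).

-- ===== PORT A =====
-- hw(x) = sum(map(int, bin(x)[2:])) = number of 1-digits of bin(x); exact for x ≥ 0 (Pre_)
def pvHw (x : Int) : Int := (PySem.Int.bitCount x : Int)

-- covers(a, b) = (a & b == b)
def pvCovers (a b : Int) : Bool := PySem.Int.band a b == b

-- A's while-loop: position i is the length of the processed prefix `acc`; the suspended
-- tail kset[i+1:] is rewritten to `top` = elements not covering kset[i].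
def pvLoopA : List Int → List Int → List Int
  | acc, [] => acc
  | acc, x :: rest => pvLoopA (acc ++ [x]) (rest.filter (fun y => !(pvCovers y x)))
termination_by _ rest => rest.length
decreasing_by
  simp only [List.length_unattach]
  exact Nat.lt_succ_of_le (le_trans (List.length_filter_le _ _) (by simp))

def size_reduce_set_naive (kset : List Int) : List Int :=
  PySem.Set.ofList (pvLoopA [] (PySem.List.sorted kset pvHw))

-- ===== PORT B =====
-- B's for-loop over the sorted candidates, growing the kept list `res`.
def pvLoopB : List Int → List Int → List Int
  | res, [] => res
  | res, x :: rest =>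
      if res.any (fun k => pvCovers x k) then pvLoopB res rest
      else pvLoopB (res ++ [x]) rest

def size_reduce_set_naive_alt (kset : List Int) : List Int :=
  PySem.Set.ofList (pvLoopB [] (PySem.List.sorted kset pvHw))

-- ===== PRECONDITION & SPEC =====
-- Pre_ excludes negative elements: there Python's hw hits bin(x) = '-0b…' and
-- int('b') raises ValueError, so A (and B) raise.
def Pre_size_reduce_set_naive (kset : List Int) : Prop := ∀ x ∈ kset, 0 ≤ x
instance (kset : List Int) : Decidable (Pre_size_reduce_set_naive kset) := by
  unfold Pre_size_reduce_set_naive; infer_instance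

def pvWitness_size_reduce_set_naive : List Int := [3, 1, 2, 7, 5]

def Spec_size_reduce_set_naive (kset : List Int) (out : List Int) : Prop := out = size_reduce_set_naive_alt kset
instance (kset : List Int) (out : List Int) : Decidable (Spec_size_reduce_set_naive kset out) := by unfold Spec_size_reduce_set_naive; infer_instance

-- ===== CLAIM (what is proved, stated in full; the proofs are below) =====
def Claim_equal_size_reduce_set_naive : Prop := ∀ (kset : List Int), Dom_size_reduce_set_naive kset → Pre_size_reduce_set_naive kset → Spec_size_reduce_set_naive kset (size_reduce_set_naive kset)

-- ===== LEMMAS AND PROOFS =====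

-- B's loop ignores elements covering some already-kept x: filtering them out in advance
-- does not change the result.
lemma pvLoopB_filter (x : Int) :
    ∀ (rest res : List Int), x ∈ res →
      pvLoopB res (rest.filter (fun y => !(pvCovers y x))) = pvLoopB res rest := by
  intro rest
  induction rest with
  | nil => intro res _; rfl
  | cons y rest ih =>
    intro res hx
    by_cases hc : pvCovers y x = true
    · have hany : res.any (fun k => pvCovers y k) = true :=
        List.any_eq_true.mpr ⟨x, hx, hc⟩
      simp [List.filter, hc, pvLoopB, hany, ih res hx]
    · simp only [List.filter, hc, Bool.not_false]
      by_cases hb : res.any (fun k => pvCovers y k) = true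
      · simp [pvLoopB, hb, ih res hx]
      · simp [pvLoopB, hb, ih (res ++ [y]) (List.mem_append_left _ hx)]

-- Main invariant: while no element of the pending tail is covered by a kept element,
-- A's shrink-worklist loop and B's grow-accumulator loop agree.
lemma pvLoopA_eq_pvLoopB :
    ∀ (n : Nat) (acc rest : List Int), rest.length ≤ n →
      (∀ y ∈ rest, ∀ k ∈ acc, pvCovers y k = false) →
      pvLoopA acc rest = pvLoopB acc rest := by
  intro n
  induction n with
  | zero =>
    intro acc rest hn _
    have : rest = [] := List.eq_nil_of_length_eq_zero (Nat.le_zero.mp hn)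
    subst this; simp [pvLoopA.eq_def, pvLoopB]
  | succ n ih =>
    intro acc rest hn hinv
    cases rest with
    | nil => simp [pvLoopA.eq_def, pvLoopB]
    | cons x rest =>

      have hx : ∀ k ∈ acc, pvCovers x k = false := hinv x (List.mem_cons_self ..)
      have hany : acc.any (fun k => pvCovers x k) = false := by
        simp only [List.any_eq_false]
        exact fun k hk => by simp [hx k hk]
      have hinv' : ∀ y ∈ rest.filter (fun y => !(pvCovers y x)),
          ∀ k ∈ acc ++ [x], pvCovers y k = false := by
        intro y hy k hk
        have hy' := List.mem_filter.mp hy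
        rcases List.mem_append.mp hk with hk | hk
        · exact hinv y (List.mem_cons_of_mem _ hy'.1) k hk
        · have : k = x := by simpa using hk
          subst this
          simpa using hy'.2
      calc pvLoopA acc (x :: rest)
          = pvLoopA (acc ++ [x]) (rest.filter (fun y => !(pvCovers y x))) := by
            rw [pvLoopA.eq_def]
        _ = pvLoopB (acc ++ [x]) (rest.filter (fun y => !(pvCovers y x))) :=
            ih _ _ (le_trans (List.length_filter_le _ _) (Nat.le_of_succ_le_succ hn)) hinv'
        _ = pvLoopB (acc ++ [x]) rest :=
            pvLoopB_filter x rest (acc ++ [x]) (List.mem_append_right _ (by simp))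
        _ = pvLoopB acc (x :: rest) := by
            rw [pvLoopB, if_neg (by simp [hany])]

-- ===== VERDICT (by name: the statement is the Claim_ definition above) =====
theorem size_reduce_set_naive_spec : Claim_equal_size_reduce_set_naive := by
  intro kset _ _
  unfold Spec_size_reduce_set_naive size_reduce_set_naive size_reduce_set_naive_alt
  rw [pvLoopA_eq_pvLoopB _ [] _ (le_refl _) (by simp)]
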